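-- pv_equiv track=rewrite | github.com/salt-bevy/salt-bevy | configure_machine/helpers/argv_quote.py | win_concat_quote
-- ===== SOURCE A (Python) =====
-- def win_concat_quote(command_line: str, argument: str) -> str:
--     """
--     appends the given argument to a command line such that CommandLineToArgvW will return
--     the argument string unchanged.
--     """
--     # from https://blogs.msdn.microsoft.com/twistylittlepassagesallalike/2011/04/23/everyone-quotes-command-line-arguments-the-wrong-way/
--     # by Daniel Colascione April 23, 2011
--
--             # // don't quote unless we actually
--             # // need to do so - -- hopefully avoid problems if programs won't
--             # // parse quotes properly
--             # //
--     result = command_line + " "  if command_line else "" # vdc - I will automatically add a space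
--
--     if argument:                  # if (Force == false &$ Argument.empty() == false &&
--         if len(argument.split()) == 1:  # // if no white space or double quote embedded in argument
--             if '"' not in argument:     #  Argument.find_first_of(L" \t\n\v\"") == Argument.npos)
--                 result += argument      # { CommandLine.append(Argument); }
--                 return result
--                                   # else {
--     result += '"'                 #     CommandLine.push_back(L'"');
--     it = 0
--     end = len(argument)
--     while it < end:                # for (auto It = Argument.begin () ;; ++It) {
--         number_backslashes = 0     # unsigned NumberBackslashes = 0;
--         char = argument[it]
--         #
--         while char == '\\':  # while (It != Argument.end() && * It == L'\\') {
--             it += 1                 # ++It;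
--             number_backslashes += 1 # ++NumberBackslashes;
--             try:
--                 char = argument[it]
--             except IndexError:
--                 break             # }
--         if it >= end:            # if (It == Argument.end())
--                                  # // Escape all backslashes, but let the terminating
--                                  # // double quotation mark we add below be interpreted
--                                  # // as a metacharacter.
--             result +=  '\\' * (number_backslashes * 2)  # CommandLine.append (NumberBackslashes * 2, L'\\');
--             break                # break;
--         # }
--         elif char == '"':  # else if (*It == L'"') {
--             # // Escape all backslashes and the following
--             # // double quotation mark.
--             result += '\\' * (number_backslashes * 2 + 1)  # CommandLine.append(NumberBackslashes * 2 + 1, L'\\');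
--             result += char                            # CommandLine.push_back(*It);
--         else:                                         # else {
--             # // Backslashes aren't special here.
--             result += '\\' * number_backslashes            # CommandLine.append(NumberBackslashes, L'\\');
--             result += char                                 # CommandLine.push_back(*It);
--         it += 1
--     result += '"'                                      # CommandLine.push_back(L '"');
--     return result
-- ===== SOURCE B (Python) =====
-- def win_concat_quote(command_line: str, argument: str) -> str:
--     """
--     appends the given argument to a command line such that CommandLineToArgvW will return
--     the argument string unchanged.
--     """
--     prefix = command_line + " " if command_line else ""
--     if argument and len(argument.split()) == 1 and '"' not in argument:
--         return prefix + argument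
--     # Build the escaped argument back-to-front: a backslash is doubled exactly
--     # when everything to its right up to the next non-backslash is a '"' or the
--     # end of the string.  One reversed pass, no run counting.
--     out = []
--     dbl = True          # True: backslashes here precede a '"' or the end
--     for c in reversed(argument):
--         if c == '"':
--             out.append('\\"')
--             dbl = True
--         elif c == '\\':
--             out.append('\\\\' if dbl else '\\')
--         else:
--             out.append(c)
--             dbl = False
--     return prefix + '"' + ''.join(reversed(out)) + '"'
-- ===== Notes on version B (the rewrite author's own statement) =====
-- stated objective: alternative
-- what changed: A's left-to-right index/number_backslashes state machine over the argument is replaced by a single back-to-front pass: scanning reversed(argument), a backslash is doubled exactly when the already-seen suffix begins with backslashes followed by a quote or the end of the string, so no run counting or index bookkeeping is needed.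
import Mathlib
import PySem

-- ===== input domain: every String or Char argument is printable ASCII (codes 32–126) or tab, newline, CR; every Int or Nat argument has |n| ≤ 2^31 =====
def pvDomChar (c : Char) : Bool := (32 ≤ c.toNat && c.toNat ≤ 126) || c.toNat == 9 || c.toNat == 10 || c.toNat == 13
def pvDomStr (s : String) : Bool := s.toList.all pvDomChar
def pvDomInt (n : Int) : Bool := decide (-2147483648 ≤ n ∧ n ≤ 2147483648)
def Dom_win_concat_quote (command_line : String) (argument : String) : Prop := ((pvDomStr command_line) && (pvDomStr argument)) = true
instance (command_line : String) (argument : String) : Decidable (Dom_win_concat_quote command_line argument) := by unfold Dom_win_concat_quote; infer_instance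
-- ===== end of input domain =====

-- B replaces A's left-to-right index/number_backslashes state machine by a single
-- back-to-front pass (objective: alternative, same cost); equivalence of B with A is
-- proved for all inputs (both functions are total).

-- ===== PORT A =====
-- inner 'while char == '\\'' loop of A: returns (number_backslashes, remaining suffix)
def countBS : List Char → Nat × List Char
  | [] => (0, [])
  | c :: cs => if c = '\\' then ((countBS cs).1 + 1, (countBS cs).2) else (0, c :: cs)

-- needed (by name) for aLoop's termination proof
theorem countBS_eq (cs : List Char) :
    cs = List.replicate (countBS cs).1 '\\' ++ (countBS cs).2 := by
  induction cs with
  | nil => simp [countBS]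
  | cons c cs ih =>
    by_cases h : c = '\\' <;> simp [countBS, h, List.replicate_succ]
    exact ih

-- outer 'while it < end' loop of A, appending to the accumulated result
def aLoop (cs : List Char) (acc : List Char) : List Char :=
  match h : countBS cs with
  | (n, []) => acc ++ List.replicate (n * 2) '\\'
  | (n, c :: rest) =>
    if c = '"' then aLoop rest (acc ++ List.replicate (n * 2 + 1) '\\' ++ ['"'])
    else aLoop rest (acc ++ List.replicate n '\\' ++ [c])
termination_by cs.length
decreasing_by
  all_goals
    have hlen := congrArg List.length (countBS_eq cs)
    rw [h] at hlen
    simp at hlen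
    omega

def win_concat_quote (command_line : String) (argument : String) : String :=
  let result := if command_line = "" then "" else command_line ++ " "
  if argument ≠ "" ∧ (PySem.Str.split₀ argument).length = 1 ∧ PySem.Str.isIn "\"" argument = false then
    result ++ argument
  else
    ((result ++ "\"") ++ String.ofList (aLoop argument.toList [])) ++ "\""

-- ===== PORT B =====
-- one step of B's 'for c in reversed(argument)' loop; state = (out, dbl)
def bStep (st : List (List Char) × Bool) (c : Char) : List (List Char) × Bool :=
  if c = '"' then (st.1 ++ [['\\', '"']], true)
  else if c = '\\' then (st.1 ++ [if st.2 then ['\\', '\\'] else ['\\']], st.2)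
  else (st.1 ++ [[c]], false)

def win_concat_quote_alt (command_line : String) (argument : String) : String :=
  -- 'prefix' in Source B is renamed pfx ('prefix' is a Lean keyword)
  let pfx := if command_line = "" then "" else command_line ++ " "
  if argument ≠ "" ∧ (PySem.Str.split₀ argument).length = 1 ∧ PySem.Str.isIn "\"" argument = false then
    pfx ++ argument
  else
    let st := argument.toList.reverse.foldl bStep ([], true)
    ((pfx ++ "\"") ++ String.ofList st.1.reverse.flatten) ++ "\""

-- ===== PRECONDITION & SPEC =====
def Spec_win_concat_quote (command_line : String) (argument : String) (out : String) : Prop := out = win_concat_quote_alt command_line argument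
instance (command_line : String) (argument : String) (out : String) : Decidable (Spec_win_concat_quote command_line argument out) := by unfold Spec_win_concat_quote; infer_instance

-- ===== CLAIM (what is proved, stated in full; the proofs are below) =====
def Claim_equal_win_concat_quote : Prop := ∀ (command_line : String) (argument : String), Dom_win_concat_quote command_line argument → Spec_win_concat_quote command_line argument (win_concat_quote command_line argument)

-- ===== LEMMAS AND PROOFS =====

-- dFlag cs = B's dbl state after the suffix cs has been processed right-to-left:
-- true iff cs is all backslashes or its leading backslash run is followed by '"'
def dFlag : List Char → Bool
  | [] => true
  | c :: cs => if c = '"' then true else if c = '\\' then dFlag cs else false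

-- the chunks B emits, listed left-to-right
def chunksLR : List Char → List (List Char)
  | [] => []
  | c :: cs =>
    (if c = '"' then ['\\', '"']
     else if c = '\\' then (if dFlag cs then ['\\', '\\'] else ['\\'])
     else [c]) :: chunksLR cs

def esc (cs : List Char) : List Char := (chunksLR cs).flatten

theorem bFold_eq (cs : List Char) (out0 : List (List Char)) :
    cs.reverse.foldl bStep (out0, true) = (out0 ++ (chunksLR cs).reverse, dFlag cs) := by
  induction cs generalizing out0 with
  | nil => simp [chunksLR, dFlag]
  | cons c cs ih =>
    rw [List.reverse_cons, List.foldl_append, ih]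
    by_cases h1 : c = '"' <;> by_cases h2 : c = '\\' <;>
      simp [bStep, chunksLR, dFlag, h1, h2]

theorem dFlag_replicate (n : Nat) (r : List Char) :
    dFlag (List.replicate n '\\' ++ r) = dFlag r := by
  induction n with
  | zero => simp
  | succ n ih => simp [List.replicate_succ, dFlag, ih]

theorem esc_replicate (n : Nat) (r : List Char) :
    esc (List.replicate n '\\' ++ r)
      = List.replicate (if dFlag r then n * 2 else n) '\\' ++ esc r := by
  induction n with
  | zero => simp
  | succ n ih =>
    rw [List.replicate_succ, List.cons_append]
    show esc ('\\' :: (List.replicate n '\\' ++ r)) = _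
    rw [show esc ('\\' :: (List.replicate n '\\' ++ r))
        = (if dFlag (List.replicate n '\\' ++ r) then ['\\', '\\'] else ['\\'])
          ++ esc (List.replicate n '\\' ++ r) from by simp [esc, chunksLR]]
    rw [dFlag_replicate, ih]
    cases h : dFlag r <;>
      simp [List.replicate_succ, Nat.succ_mul]

theorem countBS_head (cs : List Char) (c : Char) (rest : List Char)
    (h : (countBS cs).2 = c :: rest) : c ≠ '\\' := by
  induction cs with
  | nil => simp [countBS] at h
  | cons d cs ih =>
    by_cases hd : d = '\\'
    · simp [countBS, hd] at h; exact ih h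
    · simp [countBS, hd] at h; rw [← h.1]; exact hd

theorem aLoop_eq (cs acc : List Char) : aLoop cs acc = acc ++ esc cs := by
  induction hn : cs.length using Nat.strong_induction_on generalizing cs acc with
  | _ n ih =>
    rw [aLoop]
    split
    next k heq =>
      have hcs := countBS_eq cs
      rw [heq] at hcs
      simp only [List.append_nil] at hcs
      have h2 := esc_replicate k []
      simp only [dFlag, if_true, esc, chunksLR, List.flatten_nil, List.append_nil] at h2
      rw [hcs]
      simp only [esc, h2]
    next k c rest heq =>
      have hcs := countBS_eq cs
      rw [heq] at hcs
      have hlt : rest.length < n := by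
        have := congrArg List.length hcs
        simp at this
        omega
      by_cases hq : c = '"'
      · rw [if_pos hq, ih rest.length hlt rest _ rfl, hcs, esc_replicate]
        subst hq
        simp [esc, chunksLR, dFlag, List.replicate_succ', List.append_assoc]
      · rw [if_neg hq, ih rest.length hlt rest _ rfl, hcs, esc_replicate]
        have hbs : c ≠ '\\' := countBS_head cs c rest (by rw [heq])
        simp [esc, chunksLR, dFlag, hq, hbs, List.append_assoc]

-- ===== VERDICT (by name: the statement is the Claim_ definition above) =====
theorem win_concat_quote_spec : Claim_equal_win_concat_quote := by
  intro command_line argument _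
  unfold Spec_win_concat_quote win_concat_quote win_concat_quote_alt
  by_cases h : argument ≠ "" ∧ (PySem.Str.split₀ argument).length = 1 ∧ PySem.Str.isIn "\"" argument = false
  · simp only [if_pos h]
  · simp only [if_neg h]
    rw [aLoop_eq, bFold_eq]
    simp [esc]
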